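-- pv_equiv track=rewrite | github.com/ADITYA-KR-04/competitive-coding | Python/pat.py | pat
-- ===== SOURCE A (Python) =====
-- def pat(n):
--     s=""
--     for i in range(0,n):
--         for j in range(1,i):
--             if j!=(i-1):
--                 s+="\n"
--             else:
--                 s+=str(j)
--     return s
-- ===== SOURCE B (Python) =====
-- def pat(n):
--     return "".join("\n" * (i - 2) + str(i - 1) for i in range(2, n))
-- ===== Notes on version B (the rewrite author's own statement) =====
-- stated objective: simpler
-- what changed: Replaces the nested loop with per-character branch (append '\n' unless j==i-1) by a single pass over rows that computes each row's newline block in closed form as '\n'*(i-2) followed by str(i-1), joined once.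
import Mathlib
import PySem

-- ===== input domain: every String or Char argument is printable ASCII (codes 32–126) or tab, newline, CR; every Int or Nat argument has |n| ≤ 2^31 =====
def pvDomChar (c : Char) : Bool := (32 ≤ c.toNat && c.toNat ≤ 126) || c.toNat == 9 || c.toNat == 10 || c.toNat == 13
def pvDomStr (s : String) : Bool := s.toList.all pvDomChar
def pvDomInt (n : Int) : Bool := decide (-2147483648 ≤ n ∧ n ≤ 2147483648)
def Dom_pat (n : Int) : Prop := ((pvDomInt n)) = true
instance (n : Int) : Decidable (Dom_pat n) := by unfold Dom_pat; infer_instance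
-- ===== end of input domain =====

-- B replaces A's nested per-character loop (append '\n' unless j == i-1) by joining, per row,
-- a closed-form newline block '\n'*(i-2) followed by str(i-1): simpler, one pass, no branch.


-- ===== PORT A =====
def pat (n : Int) : String :=
  (PySem.List.pyRange 0 n 1).foldl (fun s i =>
    (PySem.List.pyRange 1 i 1).foldl (fun s j =>
      if j ≠ i - 1 then s ++ "\n" else s ++ PySem.Int.toStr j) s) ""

-- ===== PORT B =====
def pat_alt (n : Int) : String :=
  PySem.Str.join "" ((PySem.List.pyRange 2 n 1).map (fun i =>
    String.ofList (PySem.List.pyRepeat ['\n'] (i - 2)) ++ PySem.Int.toStr (i - 1)))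

-- ===== PRECONDITION & SPEC =====
def Spec_pat (n : Int) (out : String) : Prop := out = pat_alt n
instance (n : Int) (out : String) : Decidable (Spec_pat n out) := by unfold Spec_pat; infer_instance

-- ===== CLAIM (what is proved, stated in full; the proofs are below) =====
def Claim_equal_pat : Prop := ∀ (n : Int), Dom_pat n → Spec_pat n (pat n)

-- ===== LEMMAS AND PROOFS =====

-- characters of the row contributed by outer index i (for i ≥ 2)
def rowChars (i : Int) : List Char :=
  List.replicate (i - 2).toNat '\n' ++ PySem.Int.toChars (i - 1)

-- characters contributed by outer index i (empty for i < 2)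
def rowOf (i : Int) : List Char := if 2 ≤ i then rowChars i else []

theorem join_empty_cons (a : List Char) (l : List (List Char)) :
    PySem.Chars.join [] (a :: l) = a ++ PySem.Chars.join [] l := by
  cases l with
  | nil => simp [PySem.Chars.join_singleton, PySem.Chars.join_nil]
  | cons b t => rw [PySem.Chars.join_cons_cons]; simp

theorem join_empty_flatten (l : List (List Char)) :
    PySem.Chars.join [] l = l.flatten := by
  induction l with
  | nil => simp [PySem.Chars.join_nil]
  | cons a t ih => rw [join_empty_cons, ih]; simp

theorem pat_alt_toList (n : Int) :
    (pat_alt n).toList = ((PySem.List.pyRange 2 n 1).map rowChars).flatten := by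
  unfold pat_alt
  rw [PySem.Str.toList_join]
  have he : ("" : String).toList = [] := rfl
  rw [he, join_empty_flatten]
  simp only [List.map_map]
  congr 1
  refine List.map_congr_left (fun i _ => ?_)
  simp [rowChars, PySem.List.pyRepeat_singleton, PySem.Int.toList_toStr]

theorem foldl_newlines (l : List Int) (s : String) :
    l.foldl (fun s _ => s ++ "\n") s = s ++ String.ofList (List.replicate l.length '\n') := by
  induction l generalizing s with
  | nil => simp
  | cons a t ih =>
      simp only [List.foldl_cons, List.length_cons, ih]
      rw [List.replicate_succ]
      have : "\n" = String.ofList ['\n'] := rfl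
      rw [this, ← String.toList_inj]
      simp

theorem inner_lt (i : Int) (h : i < 2) (s : String) :
    (PySem.List.pyRange 1 i 1).foldl (fun s j =>
      if j ≠ i - 1 then s ++ "\n" else s ++ PySem.Int.toStr j) s = s := by
  rw [PySem.List.pyRange_one_eq_nil (by omega)]
  rfl

theorem inner_ge (i : Int) (h : 2 ≤ i) (s : String) :
    (PySem.List.pyRange 1 i 1).foldl (fun s j =>
      if j ≠ i - 1 then s ++ "\n" else s ++ PySem.Int.toStr j) s
      = s ++ String.ofList (rowChars i) := by
  have hsplit : PySem.List.pyRange 1 i 1 = PySem.List.pyRange 1 (i - 1) 1 ++ [i - 1] := by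
    have h1 : i - 1 + 1 = i := by omega
    rw [← h1, PySem.List.pyRange_one_succ_right (by omega), h1]
  rw [hsplit, List.foldl_append]
  have hpre : (PySem.List.pyRange 1 (i - 1) 1).foldl (fun s j =>
      if j ≠ i - 1 then s ++ "\n" else s ++ PySem.Int.toStr j) s
      = (PySem.List.pyRange 1 (i - 1) 1).foldl (fun s _ => s ++ "\n") s := by
    refine PySem.List.foldl_congr_mem _ _ _ _ (fun acc x hx => ?_)
    rw [PySem.List.mem_pyRange_one] at hx
    rw [if_pos (by omega)]
  rw [hpre, foldl_newlines]
  simp only [List.foldl_cons, List.foldl_nil, if_neg (by omega : ¬ (i - 1 ≠ i - 1))]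
  rw [PySem.List.length_pyRange_one]
  have h2 : (i - 1 - 1) = i - 2 := by omega
  rw [h2, rowChars, String.append_assoc]
  congr 1
  rw [← String.toList_inj]
  simp [PySem.Int.toList_toStr]

theorem foldl_rows (l : List Int) (s : String)
    (hf : ∀ i ∈ l, ∀ t : String,
      (PySem.List.pyRange 1 i 1).foldl (fun s j =>
        if j ≠ i - 1 then s ++ "\n" else s ++ PySem.Int.toStr j) t
        = t ++ String.ofList (rowOf i)) :
    l.foldl (fun s i =>
      (PySem.List.pyRange 1 i 1).foldl (fun s j =>
        if j ≠ i - 1 then s ++ "\n" else s ++ PySem.Int.toStr j) s) s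
    = s ++ String.ofList ((l.map rowOf).flatten) := by
  induction l generalizing s with
  | nil => simp
  | cons a t ih =>
      simp only [List.foldl_cons, List.map_cons, List.flatten_cons]
      rw [hf a (List.mem_cons_self) s, ih _ (fun i hi => hf i (List.mem_cons_of_mem _ hi))]
      rw [String.append_assoc]
      congr 1
      rw [← String.toList_inj]
      simp

theorem pat_toList (n : Int) :
    (pat n).toList = ((PySem.List.pyRange 0 n 1).map rowOf).flatten := by
  unfold pat
  rw [foldl_rows _ _ (fun i _ t => ?_)]
  · simp
  · by_cases h : 2 ≤ i
    · rw [inner_ge i h t, rowOf, if_pos h]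
    · rw [inner_lt i (by omega) t, rowOf, if_neg h]
      simp

theorem rows_agree (n : Int) :
    ((PySem.List.pyRange 0 n 1).map rowOf).flatten
      = ((PySem.List.pyRange 2 n 1).map rowChars).flatten := by
  by_cases h : 2 ≤ n
  · rw [PySem.List.pyRange_one_append 0 2 n (by omega) h, List.map_append, List.flatten_append]
    have h02 : ((PySem.List.pyRange 0 2 1).map rowOf).flatten = [] := by decide
    rw [h02, List.nil_append]
    congr 1
    refine List.map_congr_left (fun i hi => ?_)
    rw [PySem.List.mem_pyRange_one] at hi
    rw [rowOf, if_pos (by omega)]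
  · rw [PySem.List.pyRange_one_eq_nil (a := 2) (by omega)]
    simp only [List.map_nil, List.flatten_nil]
    refine List.flatten_eq_nil_iff.mpr (fun l hl => ?_)
    obtain ⟨i, hi, rfl⟩ := List.mem_map.mp hl
    rw [PySem.List.mem_pyRange_one] at hi
    rw [rowOf, if_neg (by omega)]

-- ===== VERDICT (by name: the statement is the Claim_ definition above) =====
theorem pat_spec : Claim_equal_pat := by
  intro n _
  unfold Spec_pat
  rw [← String.toList_inj, pat_toList, pat_alt_toList, rows_agree]
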